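-- pv_equiv track=rewrite | github.com/Sharmapank-j/MedObsMind | backend/app/services/ddma_agent.py | _should_use_tool
-- ===== SOURCE A (Python) =====
-- from typing import List, Dict, Optional, AsyncGenerator, Any
--
-- def _should_use_tool(messages: List[Dict], tools: List[Dict]) -> bool:
--     """
--     Determine if a tool should be called based on message content
--
--     Args:
--         messages: Conversation messages
--         tools: Available tools
--
--     Returns:
--         True if tool should be called
--     """
--     last_user_message = ""
--     for msg in reversed(messages):
--         if msg["role"] == "user":
--             last_user_message = msg["content"].lower()
--             break
--
--     # Simple keyword matching (in production, use LLM to determine)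
--     tool_keywords = {
--         "get_patient_vitals": ["vitals", "heart rate", "blood pressure", "spo2", "temperature"],
--         "calculate_clinical_score": ["news2", "qsofa", "sofa", "score", "calculate"],
--         "search_guidelines": ["guideline", "protocol", "icmr", "aiims", "recommendation"],
--         "check_drug_interaction": ["drug", "medication", "interaction", "dosage"],
--         "get_disease_info": ["what is", "tell me about", "disease", "condition", "diagnosis"],
--         "analyze_trend": ["trend", "change", "over time", "progression", "deterioration"]
--     }
--
--     for tool_name, keywords in tool_keywords.items():
--         if any(keyword in last_user_message for keyword in keywords):
--             return True
--
--     return False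
-- ===== SOURCE B (Python) =====
-- from typing import List, Dict
--
-- _TOOL_KEYWORDS = {
--     "get_patient_vitals": ["vitals", "heart rate", "blood pressure", "spo2", "temperature"],
--     "calculate_clinical_score": ["news2", "qsofa", "sofa", "score", "calculate"],
--     "search_guidelines": ["guideline", "protocol", "icmr", "aiims", "recommendation"],
--     "check_drug_interaction": ["drug", "medication", "interaction", "dosage"],
--     "get_disease_info": ["what is", "tell me about", "disease", "condition", "diagnosis"],
--     "analyze_trend": ["trend", "change", "over time", "progression", "deterioration"]
-- }
--
-- # Keywords grouped by their first character: the message is scanned ONCE,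
-- # position by position, dispatching on the character at that position.
-- _BY_FIRST = {}
-- for _kws in _TOOL_KEYWORDS.values():
--     for _kw in _kws:
--         _BY_FIRST.setdefault(_kw[0], []).append(_kw)
--
--
-- def _should_use_tool(messages: List[Dict], tools: List[Dict]) -> bool:
--     last_user_message = ""
--     for msg in reversed(messages):
--         if msg["role"] == "user":
--             last_user_message = msg["content"].lower()
--             break
--
--     # Single left-to-right scan of the message: at each position, only the
--     # keywords starting with the character seen there are tried.
--     for i, ch in enumerate(last_user_message):
--         for kw in _BY_FIRST.get(ch, ()):
--             if last_user_message.startswith(kw, i):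
--                 return True
--     return False
-- ===== Notes on version B (the rewrite author's own statement) =====
-- stated objective: alternative
-- what changed: Instead of testing each of the 29 keywords with an independent substring search over the message, B scans the message once left-to-right and at each position tries only the keywords whose first character matches, via a precomputed first-character dispatch table; the last-user-message extraction loop is kept verbatim.
import Mathlib
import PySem

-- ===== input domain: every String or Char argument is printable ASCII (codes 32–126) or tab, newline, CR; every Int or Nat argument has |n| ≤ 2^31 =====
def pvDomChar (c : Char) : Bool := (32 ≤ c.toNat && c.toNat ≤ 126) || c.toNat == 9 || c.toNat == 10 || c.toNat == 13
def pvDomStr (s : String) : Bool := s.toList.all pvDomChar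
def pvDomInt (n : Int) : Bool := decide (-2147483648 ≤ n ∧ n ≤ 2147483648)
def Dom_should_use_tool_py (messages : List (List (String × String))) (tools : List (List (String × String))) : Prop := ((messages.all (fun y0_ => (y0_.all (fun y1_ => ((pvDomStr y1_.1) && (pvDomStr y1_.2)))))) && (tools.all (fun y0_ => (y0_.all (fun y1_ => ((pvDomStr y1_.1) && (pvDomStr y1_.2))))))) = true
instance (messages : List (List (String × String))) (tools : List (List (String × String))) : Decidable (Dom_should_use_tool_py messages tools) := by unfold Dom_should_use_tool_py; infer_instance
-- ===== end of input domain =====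

-- B replaces the keywords-outer nested membership loop by ONE left-to-right scan of the
-- message that, at each position, tries only the keywords starting with the character there
-- (a first-character dispatch table); the last-user-message extraction loop is kept verbatim.
-- Objective: alternative (single-scan dispatch instead of 29 independent substring searches).

-- ===== PORT A =====
-- shared helper: both Pythons extract the last user message with the IDENTICAL loop
-- (for msg in reversed(messages): if msg["role"]=="user": last = msg["content"].lower(); break);
-- none = the KeyError Python raises on a missing "role"/"content" key (excluded by Pre_).
def pvLastUserLower : List (List (String × String)) → Option String
  | [] => some ""
  | m :: rest =>
    match (PySem.Dict.mk m).get? "role" with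
    | none => none
    | some r =>
      if r = "user" then ((PySem.Dict.mk m).get? "content").map PySem.Str.lower
      else pvLastUserLower rest

def pvToolKeywords : List (String × List String) :=
  [("get_patient_vitals", ["vitals", "heart rate", "blood pressure", "spo2", "temperature"]),
   ("calculate_clinical_score", ["news2", "qsofa", "sofa", "score", "calculate"]),
   ("search_guidelines", ["guideline", "protocol", "icmr", "aiims", "recommendation"]),
   ("check_drug_interaction", ["drug", "medication", "interaction", "dosage"]),
   ("get_disease_info", ["what is", "tell me about", "disease", "condition", "diagnosis"]),
   ("analyze_trend", ["trend", "change", "over time", "progression", "deterioration"])]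

def should_use_tool_py (messages : List (List (String × String))) (tools : List (List (String × String))) : Bool :=
  match pvLastUserLower messages.reverse with
  | none => false   -- KeyError in Python; outside Pre_
  | some last => pvToolKeywords.any (fun t => t.2.any (fun kw => PySem.Str.isIn kw last))

-- ===== PORT B =====
-- _BY_FIRST of Source B, precomputed: keywords grouped by first character.
def pvByFirst : List (Char × List String) :=
  [('v', ["vitals"]), ('h', ["heart rate"]), ('b', ["blood pressure"]),
   ('s', ["spo2", "sofa", "score"]), ('t', ["temperature", "tell me about", "trend"]),
   ('n', ["news2"]), ('q', ["qsofa"]), ('c', ["calculate", "condition", "change"]),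
   ('g', ["guideline"]), ('p', ["protocol", "progression"]), ('i', ["icmr", "interaction"]),
   ('a', ["aiims"]), ('r', ["recommendation"]),
   ('d', ["drug", "dosage", "disease", "diagnosis", "deterioration"]),
   ('m', ["medication"]), ('w', ["what is"]), ('o', ["over time"])]

def should_use_tool_py_alt (messages : List (List (String × String))) (tools : List (List (String × String))) : Bool :=
  match pvLastUserLower messages.reverse with
  | none => false   -- KeyError in Python; outside Pre_
  | some last =>
    let cs := last.toList
    -- Python `last.startswith(kw, i)` with 0 ≤ i ≤ len(last) is exactly startswith on cs.drop i
    (PySem.List.enumerate cs).any (fun p =>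
      ((pvByFirst.lookup p.2).getD []).any (fun kw =>
        PySem.Chars.startswith (cs.drop p.1.toNat) kw.toList))

-- ===== PRECONDITION & SPEC =====
-- Pre_ excludes exactly the inputs where the extraction loop raises KeyError: a message
-- scanned before the first user message (from the end) lacking "role", or that user
-- message lacking "content".
def Pre_should_use_tool_py (messages : List (List (String × String))) (tools : List (List (String × String))) : Prop :=
  (((messages.reverse.takeWhile (fun m => !((PySem.Dict.mk m).get? "role" == some "user"))).all
      (fun m => ((PySem.Dict.mk m).get? "role").isSome))
   && ((messages.reverse.dropWhile (fun m => !((PySem.Dict.mk m).get? "role" == some "user"))).head?.elim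
        true (fun m => ((PySem.Dict.mk m).get? "content").isSome))) = true
instance (messages : List (List (String × String))) (tools : List (List (String × String))) : Decidable (Pre_should_use_tool_py messages tools) := by unfold Pre_should_use_tool_py; infer_instance

def pvWitness_should_use_tool_py : (List (List (String × String))) × (List (List (String × String))) :=
  ([[("role", "user"), ("content", "Check VITALS please")]], [])

def Spec_should_use_tool_py (messages : List (List (String × String))) (tools : List (List (String × String))) (out : Bool) : Prop := out = should_use_tool_py_alt messages tools
instance (messages : List (List (String × String))) (tools : List (List (String × String))) (out : Bool) : Decidable (Spec_should_use_tool_py messages tools out) := by unfold Spec_should_use_tool_py; infer_instance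

-- ===== CLAIM (what is proved, stated in full; the proofs are below) =====
def Claim_equal_should_use_tool_py : Prop := ∀ (messages : List (List (String × String))) (tools : List (List (String × String))), Dom_should_use_tool_py messages tools → Pre_should_use_tool_py messages tools → Spec_should_use_tool_py messages tools (should_use_tool_py messages tools)

-- ===== LEMMAS AND PROOFS =====

-- the 29 keywords, flat, in A's order
def pvAllKw : List String :=
  ["vitals", "heart rate", "blood pressure", "spo2", "temperature",
   "news2", "qsofa", "sofa", "score", "calculate",
   "guideline", "protocol", "icmr", "aiims", "recommendation",
   "drug", "medication", "interaction", "dosage",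
   "what is", "tell me about", "disease", "condition", "diagnosis",
   "trend", "change", "over time", "progression", "deterioration"]

lemma pv_flatten (s : String) :
    pvToolKeywords.any (fun t => t.2.any (fun kw => PySem.Str.isIn kw s))
      = pvAllKw.any (fun kw => PySem.Str.isIn kw s) := by
  simp only [pvToolKeywords, pvAllKw, List.any_cons, List.any_nil, Bool.or_false, Bool.or_assoc]

-- every keyword is nonempty and appears in its first-character bucket
lemma pv_kw_bucket : ∀ kw ∈ pvAllKw,
    kw.toList ≠ [] ∧ kw ∈ (pvByFirst.lookup (kw.toList.headD ' ')).getD [] := by decide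

-- every bucket member is a keyword
lemma pv_bucket_kw : ∀ pr ∈ pvByFirst, ∀ kw ∈ pr.2, kw ∈ pvAllKw := by decide

lemma pv_lookup_mem {α β : Type} [BEq α] (l : List (α × β)) (k : α) (v : β)
    (h : List.lookup k l = some v) : ∃ pr ∈ l, pr.2 = v := by
  induction l with
  | nil => simp [List.lookup] at h
  | cons p t ih =>
    rw [List.lookup] at h
    cases hbe : k == p.1 with
    | true => exact ⟨p, by simp, by rw [hbe] at h; simpa using h⟩
    | false =>
      rw [hbe] at h
      obtain ⟨pr, hpr, hv⟩ := ih h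
      exact ⟨pr, by simp [hpr], hv⟩

lemma pv_scan_eq (cs : List Char) :
    pvAllKw.any (fun kw => PySem.Chars.isIn kw.toList cs)
      = (PySem.List.enumerate cs).any (fun p =>
          ((pvByFirst.lookup p.2).getD []).any (fun kw =>
            PySem.Chars.startswith (cs.drop p.1.toNat) kw.toList)) := by
  apply Bool.eq_iff_iff.mpr
  simp only [List.any_eq_true]
  constructor
  · rintro ⟨kw, hmem, hin⟩
    obtain ⟨j, hpre⟩ := (PySem.Chars.exists_prefix_drop_iff_isIn kw.toList cs).mpr hin
    obtain ⟨hne, hbucket⟩ := pv_kw_bucket kw hmem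
    obtain ⟨c, t, hkw⟩ := List.exists_cons_of_ne_nil hne
    have hdrop : ∃ rest, cs.drop j = c :: rest := by
      obtain ⟨suf, hsuf⟩ := hpre
      exact ⟨t ++ suf, by rw [← hsuf, hkw]; rfl⟩
    obtain ⟨rest, hrest⟩ := hdrop
    have hj : j < cs.length := by
      by_contra h
      rw [List.drop_eq_nil_of_le (by omega)] at hrest
      simp at hrest
    have hcj : cs[j] = c := by
      have h2 : (cs.drop j)[0]? = some c := by rw [hrest]; rfl
      rw [List.getElem?_drop] at h2
      simp only [Nat.add_zero, List.getElem?_eq_getElem hj, Option.some.injEq] at h2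
      exact h2
    refine ⟨((j : Int), cs[j]), ?_, kw, ?_, ?_⟩
    · rw [PySem.List.mem_enumerate_iff]
      exact ⟨j, hj, by simp⟩
    · rw [hcj]
      have : kw.toList.headD ' ' = c := by rw [hkw]; rfl
      rwa [← this]
    · rw [PySem.Chars.startswith_iff]
      simpa using hpre
  · rintro ⟨p, hp, kw, hkw, hsw⟩
    rw [PySem.List.mem_enumerate_iff] at hp
    obtain ⟨k, hk, hpk⟩ := hp
    refine ⟨kw, ?_, ?_⟩
    · rcases hlk : pvByFirst.lookup p.2 with _ | kws
      · rw [hlk] at hkw; simp at hkw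
      · rw [hlk] at hkw
        simp only [Option.getD_some] at hkw
        obtain ⟨pr, hpr, hv⟩ := pv_lookup_mem _ _ _ hlk
        exact pv_bucket_kw pr hpr kw (hv ▸ hkw)
    · rw [← PySem.Chars.exists_prefix_drop_iff_isIn]
      exact ⟨p.1.toNat, (PySem.Chars.startswith_iff _ _).mp hsw⟩

-- ===== VERDICT (by name: the statement is the Claim_ definition above) =====
theorem should_use_tool_py_spec : Claim_equal_should_use_tool_py := by
  intro messages tools _ _
  unfold Spec_should_use_tool_py should_use_tool_py should_use_tool_py_alt
  cases pvLastUserLower messages.reverse with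
  | none => rfl
  | some last =>
    show (pvToolKeywords.any fun t => t.2.any fun kw => PySem.Str.isIn kw last)
        = ((PySem.List.enumerate last.toList).any fun p =>
            ((List.lookup p.2 pvByFirst).getD []).any fun kw =>
              PySem.Chars.startswith (List.drop p.1.toNat last.toList) kw.toList)
    rw [pv_flatten]
    simp only [PySem.Str.isIn_eq]
    exact pv_scan_eq last.toList
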